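-- pv_equiv track=rewrite | github.com/busyyang/generative_chestxray | LatentDiffusionModel/src/preprocessing/create_carm_dataset.py | name_string
-- ===== SOURCE A (Python) =====
-- def name_string(vertebrae:list):
--     v_dict = {
--         1: 'C1', 2: 'C2', 3: 'C3', 4: 'C4', 5: 'C5', 6: 'C6', 7: 'C7',
--         8: 'T1', 9: 'T2', 10: 'T3', 11: 'T4', 12: 'T5', 13: 'T6', 14: 'T7',
--         15: 'T8', 16: 'T9', 17: 'T10', 18: 'T11', 19: 'T12',
--         20: 'L1', 21: 'L2', 22: 'L3', 23: 'L4', 24: 'L5', 25: 'L6', 26: 'Sacrum'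
--     }
--     if len(vertebrae) == 1:
--         return v_dict[vertebrae[0]]
--     elif len(vertebrae) == 2:
--         return f'{v_dict[vertebrae[0]]} and {v_dict[vertebrae[1]]}'
--     else:
--         name_str =''
--         for i in range(len(vertebrae)-2):
--             name_str += f'{v_dict[vertebrae[i]]}, '
--         name_str += f'{v_dict[vertebrae[-2]]} and {v_dict[vertebrae[-1]]}'
--         return name_str
-- ===== SOURCE B (Python) =====
-- def name_string(vertebrae: list):
--     def name(x):
--         # closed-form name: C1-C7 are 1-7, T1-T12 are 8-19, L1-L6 are 20-25, Sacrum is 26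
--         if x <= 7:
--             return 'C%d' % x
--         if x <= 19:
--             return 'T%d' % (x - 7)
--         if x <= 25:
--             return 'L%d' % (x - 19)
--         return 'Sacrum'
--     # build the sentence back-to-front
--     out = name(vertebrae[-1])
--     if len(vertebrae) >= 2:
--         out = name(vertebrae[-2]) + ' and ' + out
--     for x in reversed(vertebrae[:-2]):
--         out = name(x) + ', ' + out
--     return out
-- ===== Notes on version B (the rewrite author's own statement) =====
-- stated objective: alternative
-- what changed: B replaces A's 26-entry lookup dict with a closed-form arithmetic name computation (C/T/L prefix plus offset) and builds the sentence back-to-front with a right-to-left accumulator instead of A's three length branches with a front-to-back index loop.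
-- outside the precondition, e.g. on name_string([0]): A raises KeyError, B returns 'C0'; on name_string([]): A raises IndexError, B raises IndexError
import Mathlib
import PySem

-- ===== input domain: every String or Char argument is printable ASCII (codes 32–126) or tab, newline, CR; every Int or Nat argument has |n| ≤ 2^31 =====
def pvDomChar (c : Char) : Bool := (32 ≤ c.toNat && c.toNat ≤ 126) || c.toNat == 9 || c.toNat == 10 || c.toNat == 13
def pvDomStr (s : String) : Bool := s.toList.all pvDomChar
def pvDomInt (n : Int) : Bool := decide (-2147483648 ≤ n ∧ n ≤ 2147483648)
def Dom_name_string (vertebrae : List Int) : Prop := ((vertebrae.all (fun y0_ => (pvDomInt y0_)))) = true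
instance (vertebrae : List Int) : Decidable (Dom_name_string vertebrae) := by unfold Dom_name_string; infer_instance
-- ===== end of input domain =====

-- B computes each name by a closed-form arithmetic rule instead of A's lookup dict and
-- assembles the sentence back-to-front with a right-to-left accumulator; proved equal on Pre_.

-- ===== PORT A =====
-- the literal dict of A
def pvVDict : PySem.Dict Int String := PySem.Dict.ofList
  [(1, "C1"), (2, "C2"), (3, "C3"), (4, "C4"), (5, "C5"), (6, "C6"), (7, "C7"),
   (8, "T1"), (9, "T2"), (10, "T3"), (11, "T4"), (12, "T5"), (13, "T6"), (14, "T7"),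
   (15, "T8"), (16, "T9"), (17, "T10"), (18, "T11"), (19, "T12"),
   (20, "L1"), (21, "L2"), (22, "L3"), (23, "L4"), (24, "L5"), (25, "L6"), (26, "Sacrum")]

-- v_dict[x]: Pre_ guarantees the key is present, so getD's default is never used
def name_string (vertebrae : List Int) : String :=
  if vertebrae.length == 1 then
    pvVDict.getD (PySem.List.pyGetD vertebrae 0 0) ""
  else if vertebrae.length == 2 then
    pvVDict.getD (PySem.List.pyGetD vertebrae 0 0) "" ++ " and " ++
      pvVDict.getD (PySem.List.pyGetD vertebrae 1 0) ""
  else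
    ((PySem.List.pyRange 0 (PySem.List.len vertebrae - 2) 1).foldl
        (fun acc i => acc ++ pvVDict.getD (PySem.List.pyGetD vertebrae i 0) "" ++ ", ") "")
      ++ (pvVDict.getD (PySem.List.pyGetD vertebrae (-2) 0) "" ++ " and " ++
          pvVDict.getD (PySem.List.pyGetD vertebrae (-1) 0) "")

-- ===== PORT B =====
-- closed-form name: C1-C7 are 1-7, T1-T12 are 8-19, L1-L6 are 20-25, Sacrum is 26
def pvNameOf (x : Int) : String :=
  if x ≤ 7 then "C" ++ PySem.Int.toStr x
  else if x ≤ 19 then "T" ++ PySem.Int.toStr (x - 7)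
  else if x ≤ 25 then "L" ++ PySem.Int.toStr (x - 19)
  else "Sacrum"

-- vertebrae[-1] / vertebrae[-2]: Pre_ guarantees the index is in range, so the default is never used
def name_string_alt (vertebrae : List Int) : String :=
  let out0 := pvNameOf (PySem.List.pyGetD vertebrae (-1) 0)
  let out1 := if 2 ≤ vertebrae.length then
      pvNameOf (PySem.List.pyGetD vertebrae (-2) 0) ++ " and " ++ out0
    else out0
  ((PySem.List.slice vertebrae none (some (-2))).reverse).foldl
    (fun out x => pvNameOf x ++ ", " ++ out) out1

-- ===== PRECONDITION & SPEC =====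
-- Pre_ excludes exactly the inputs on which A raises: the empty list (IndexError) and
-- lists containing an ID outside 1..26 (KeyError; B returns a made-up name such as 'C0' there).
def Pre_name_string (vertebrae : List Int) : Prop :=
  vertebrae ≠ [] ∧ ∀ x ∈ vertebrae, 1 ≤ x ∧ x ≤ 26
instance (vertebrae : List Int) : Decidable (Pre_name_string vertebrae) := by
  unfold Pre_name_string; infer_instance
def pvWitness_name_string : List Int := [3, 8, 20, 26]

def Spec_name_string (vertebrae : List Int) (out : String) : Prop := out = name_string_alt vertebrae
instance (vertebrae : List Int) (out : String) : Decidable (Spec_name_string vertebrae out) := by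
  unfold Spec_name_string; infer_instance

-- ===== CLAIM (what is proved, stated in full; the proofs are below) =====
def Claim_equal_name_string : Prop := ∀ (vertebrae : List Int), Dom_name_string vertebrae → Pre_name_string vertebrae → Spec_name_string vertebrae (name_string vertebrae)

-- ===== LEMMAS AND PROOFS =====

-- on valid keys the dict lookup and the arithmetic rule agree
theorem pvKeyEq (x : Int) (h1 : 1 ≤ x) (h2 : x ≤ 26) :
    pvVDict.getD x "" = pvNameOf x := by
  interval_cases x <;> decide

-- pulling the initial accumulator out of the comma fold
theorem pvFoldl_init (sep : List Char) (ms : List (List Char)) (init : List Char) :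
    ms.foldl (fun acc m => acc ++ m ++ sep) init
      = init ++ ms.foldl (fun acc m => acc ++ m ++ sep) [] := by
  induction ms generalizing init with
  | nil => simp
  | cons m t ih =>
    simp only [List.foldl_cons]
    rw [ih (init ++ m ++ sep), ih (([] : List Char) ++ m ++ sep)]
    simp

-- B's right-to-left accumulation equals the forward comma fold followed by the seed
theorem pvRevFold {α : Type} (g : α → String) (ms : List α) (z : String) :
    (ms.reverse.foldl (fun out x => g x ++ ", " ++ out) z).toList
      = (ms.map (fun x => (g x).toList)).foldl
          (fun acc m => acc ++ m ++ (", ").toList) [] ++ z.toList := by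
  induction ms with
  | nil => simp
  | cons m t ih =>
    rw [List.reverse_cons, List.foldl_append]
    simp only [List.foldl_cons, List.foldl_nil, String.toList_append, ih,
      List.map_cons, List.nil_append]
    rw [pvFoldl_init (", ").toList (t.map fun x => (g x).toList)
        ((g m).toList ++ (", ").toList)]
    simp

-- String-level fold turned into char-list fold
theorem pvToList_fold {α : Type} (g : α → String) (xs : List α) (init : String) :
    (xs.foldl (fun acc i => acc ++ g i ++ ", ") init).toList
      = (xs.map (fun i => (g i).toList)).foldl
          (fun acc m => acc ++ m ++ (", ").toList) init.toList := by
  induction xs generalizing init with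
  | nil => simp
  | cons x t ih => simp [ih]

-- reading the first m elements of l through getD is take m
theorem pvMap_range_getD {α : Type} (l : List α) (d : α) (m : Nat) (hm : m ≤ l.length) :
    (List.range m).map (fun k => l.getD k d) = l.take m := by
  apply List.ext_getElem
  · simp [hm]
  · intro i h1 h2
    have hi : i < m := by simpa using h1
    simp only [List.getElem_map, List.getElem_range, List.getElem_take, List.getD_eq_getElem?_getD]
    rw [List.getElem?_eq_getElem (by omega)]
    rfl

-- ===== VERDICT (by name: the statement is the Claim_ definition above) =====
theorem name_string_spec : Claim_equal_name_string := by
  intro l _ hpre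
  unfold Spec_name_string name_string name_string_alt
  have hkey : ∀ x ∈ l, pvVDict.getD x "" = pvNameOf x := fun x hx =>
    pvKeyEq x (hpre.2 x hx).1 (hpre.2 x hx).2
  have hne : l ≠ [] := hpre.1
  have hlen : 1 ≤ l.length := List.length_pos_of_ne_nil hne
  by_cases h1 : l.length = 1
  · -- singleton
    obtain ⟨x, rfl⟩ : ∃ x, l = [x] := by
      cases l with
      | nil => simp at h1
      | cons a t => cases t with
        | nil => exact ⟨a, rfl⟩
        | cons b s => simp at h1
    have hx := hkey x (by simp)
    simp_all [PySem.List.pyGetD_zero_cons, PySem.List.pyGetD_neg_one,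
      PySem.List.slice_to_neg_ofNat ([x] : List Int) 2 (by omega)]
  · by_cases h2 : l.length = 2
    · -- pair
      obtain ⟨x, y, rfl⟩ : ∃ x y, l = [x, y] := by
        match l, h2 with
        | [x, y], _ => exact ⟨x, y, rfl⟩
      have hx := hkey x (by simp)
      have hy := hkey y (by simp)
      rw [PySem.List.slice_to_neg_ofNat ([x, y] : List Int) 2 (by omega)]
      simp only [List.length_cons, List.length_nil]
      rw [PySem.List.pyGetD_neg_ofNat ([x, y] : List Int) 2 0 (by omega) (by simp),
          PySem.List.pyGetD_neg_ofNat ([x, y] : List Int) 1 0 (by omega) (by simp)]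
      simp [PySem.List.pyGetD_ofNat', hx, hy]
    · -- general case, length ≥ 3
      have h3 : 3 ≤ l.length := by omega
      have hn1 : ¬ ((l.length == 1) = true) := by simp [h1]
      have hn2 : ¬ ((l.length == 2) = true) := by simp [h2]
      simp only [if_neg hn1, if_neg hn2, if_pos (show 2 ≤ l.length by omega)]
      apply String.toList_injective
      -- the A-side loop as a char-list fold over the first n-2 names
      have hm2 : (PySem.List.len l - 2 - 0 : Int).toNat = l.length - 2 := by
        simp [PySem.List.len]; omega
      have hA : ((PySem.List.pyRange 0 (PySem.List.len l - 2) 1).foldl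
          (fun acc i => acc ++ pvVDict.getD (PySem.List.pyGetD l i 0) "" ++ ", ") "").toList
          = ((l.take (l.length - 2)).map (fun x => (pvVDict.getD x "").toList)).foldl
              (fun acc m => acc ++ m ++ (", ").toList) [] := by
        rw [PySem.List.pyRange_one, hm2, List.foldl_map, pvToList_fold]
        simp only [zero_add, PySem.List.pyGetD_natCast]
        rw [show (fun y : Nat => (pvVDict.getD (l.getD y 0) "").toList)
              = ((fun x : Int => (pvVDict.getD x "").toList) ∘ (fun k : Nat => l.getD k 0)) from rfl,
            ← List.map_map, pvMap_range_getD l 0 (l.length - 2) (by omega)]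
        rfl
      rw [String.toList_append, String.toList_append, String.toList_append, hA]
      -- the B-side reverse fold
      rw [PySem.List.slice_to_neg_ofNat l 2 (by omega), pvRevFold]
      -- negative indices
      rw [PySem.List.pyGetD_neg_ofNat l 2 0 (by omega) (by omega),
          PySem.List.pyGetD_neg_ofNat l 1 0 (by omega) (by omega)]
      -- replace the dict lookups by the arithmetic names
      have htk : ∀ x ∈ l.take (l.length - 2),
          (pvVDict.getD x "").toList = (pvNameOf x).toList := by
        intro x hx
        rw [hkey x (List.mem_of_mem_take hx)]
      rw [List.map_congr_left htk,
          hkey _ (List.getElem_mem _), hkey _ (List.getElem_mem _)]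
      simp [List.append_assoc]
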